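-- pv_equiv track=rewrite | github.com/Python-BI-2024-25/Peer_review | UtilitsforBioinfApplication/helpertools/dna_rna_tools_module.py | compl
-- ===== SOURCE A (Python) =====
-- def compl(seq):   # accepts a string - a sequence of nucleotides of any length
--     newseq = ''
--     dna_comp_dict = {'A': 'T', 'a': 't', 'T': 'A', 't': 'a', 'C': 'G', 'c': 'g', 'G': 'C', 'g': 'c'}
--     rna_comp_dict = {'A': 'U', 'a': 'u', 'U': 'A', 'u': 'a', 'C': 'G', 'c': 'g', 'G': 'C', 'g': 'c'}
--     res_test = NA_type(seq)
--     if res_test == 'DNA':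
--         newseq = ''.join([dna_comp_dict[nucl] for nucl in seq])
--     else:
--         newseq = ''.join([rna_comp_dict[nucl] for nucl in seq])
--     return (newseq)  # reterns a string - a comlement of given sequence
--
-- def NA_type(seq):  # accepts a string - a sequence of nucleotides of any length
--     d_list = ['T', 't']
--     r_list = ['U', 'u']
--     n_type = ''
--     for nucl in seq:
--         if nucl in d_list:
--             if n_type != 'RNA':
--                 n_type = 'DNA'
--             elif n_type == 'RNA':
--                 n_type = False
--                 break
--         elif nucl in r_list:
--             if n_type != 'DNA':
--                 n_type = 'RNA'
--             elif n_type == 'DNA':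
--                 n_type = False
--                 break
--     return (n_type)  # returns a string - a type of nucleic acid that is a given string, if the type can not be defined, returns None
-- ===== SOURCE B (Python) =====
-- def compl(seq):
--     # complement everything through one universal table (RNA convention: A->U, and
--     # T/U both pair back to A), then transliterate U->T in the OUTPUT iff the input
--     # was DNA (contains T and no U) -- the only U's in the output then come from A.
--     rna = {'A': 'U', 'a': 'u', 'U': 'A', 'u': 'a', 'C': 'G', 'c': 'g',
--            'G': 'C', 'g': 'c', 'T': 'A', 't': 'a'}
--     out = ''.join(rna[c] for c in seq)
--     if ('T' in seq or 't' in seq) and not ('U' in seq or 'u' in seq):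
--         out = ''.join('T' if c == 'U' else 't' if c == 'u' else c for c in out)
--     return out
-- ===== Notes on version B (the rewrite author's own statement) =====
-- stated objective: alternative
-- what changed: Drops the stateful NA_type scan and the choice between two complement tables: B complements every character through ONE universal table (RNA convention, with T also pairing to A) and then conditionally transliterates U->T in the output when the input is DNA, instead of detecting the type first and selecting a dict.
import Mathlib
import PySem

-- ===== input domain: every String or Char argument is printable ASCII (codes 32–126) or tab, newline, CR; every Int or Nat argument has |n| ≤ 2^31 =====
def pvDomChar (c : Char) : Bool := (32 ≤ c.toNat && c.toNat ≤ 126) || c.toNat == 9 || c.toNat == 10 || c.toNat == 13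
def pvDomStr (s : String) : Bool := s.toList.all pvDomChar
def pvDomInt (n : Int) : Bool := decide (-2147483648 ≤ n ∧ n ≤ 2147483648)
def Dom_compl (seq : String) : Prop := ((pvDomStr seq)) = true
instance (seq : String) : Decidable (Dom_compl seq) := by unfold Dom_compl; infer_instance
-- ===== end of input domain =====

-- B drops A's detect-type-then-select-dict structure: one universal complement table
-- (RNA convention, T also pairing to A) applied in one pass, then a conditional U->T
-- transliteration of the OUTPUT when the input is DNA. Equivalence of RETURN values on Pre_.

-- ===== PORT A =====
-- Python n_type ranges over '' / 'DNA' / 'RNA' / False; modeled as Option NAState with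
-- none = False and NAState.empty/.dna/.rna = ''/'DNA'/'RNA' (same information, same transitions,
-- branch order preserved).
inductive NAState
  | empty | dna | rna
deriving DecidableEq, Repr

-- the for-loop with break becomes structural recursion over the characters
def NA_type_loop : List Char → Option NAState → Option NAState
  | [], t => t
  | c :: rest, t =>
    if c = 'T' ∨ c = 't' then
      if t ≠ some NAState.rna then NA_type_loop rest (some NAState.dna)
      else none                      -- n_type = False; break
    else if c = 'U' ∨ c = 'u' then
      if t ≠ some NAState.dna then NA_type_loop rest (some NAState.rna)
      else none                      -- n_type = False; break
    else NA_type_loop rest t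

def NA_type (seq : String) : Option NAState := NA_type_loop seq.toList (some NAState.empty)

def dnaCompDict : PySem.Dict Char Char :=
  PySem.Dict.ofList [('A','T'), ('a','t'), ('T','A'), ('t','a'), ('C','G'), ('c','g'), ('G','C'), ('g','c')]

def rnaCompDict : PySem.Dict Char Char :=
  PySem.Dict.ofList [('A','U'), ('a','u'), ('U','A'), ('u','a'), ('C','G'), ('c','g'), ('G','C'), ('g','c')]

-- dict[nucl] raises KeyError on a missing key; Pre_compl excludes those inputs, so the
-- getD default is never reached on admitted inputs (exact on Pre_compl).
def compl (seq : String) : String :=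
  let res_test := NA_type seq
  if res_test = some NAState.dna then
    String.ofList (seq.toList.map (fun c => PySem.Dict.getD dnaCompDict c c))
  else
    String.ofList (seq.toList.map (fun c => PySem.Dict.getD rnaCompDict c c))

-- ===== PORT B =====
-- the one universal table of Source B (10 keys: RNA pairs plus T/t -> A/a)
def rnaUnivDict : PySem.Dict Char Char :=
  PySem.Dict.ofList [('A','U'), ('a','u'), ('U','A'), ('u','a'), ('C','G'), ('c','g'),
                     ('G','C'), ('g','c'), ('T','A'), ('t','a')]

-- 'T' in seq : for a single character, substring membership = character membership.
-- rna[c] raises KeyError on a missing key; excluded by Pre_compl (getD default never reached there).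
def compl_alt (seq : String) : String :=
  let out := seq.toList.map (fun c => PySem.Dict.getD rnaUnivDict c c)
  let out := if (seq.toList.contains 'T' || seq.toList.contains 't') &&
                !(seq.toList.contains 'U' || seq.toList.contains 'u') then
      out.map (fun c => if c = 'U' then 'T' else if c = 'u' then 't' else c)
    else out
  String.ofList out

-- ===== PRECONDITION & SPEC =====
-- Pre_ excludes exactly the inputs on which Python A raises KeyError: a character outside
-- the ten nucleotide letters, or a sequence containing both T/t and U/u (then the RNA table
-- is used and T/t misses). B raises on the first kind too; on the second B returns a value.
def Pre_compl (seq : String) : Prop :=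
  (seq.toList.all (fun c => (['A','C','G','T','U','a','c','g','t','u'] : List Char).contains c) = true) ∧
  (((seq.toList.contains 'T' || seq.toList.contains 't') &&
    (seq.toList.contains 'U' || seq.toList.contains 'u')) = false)
instance (seq : String) : Decidable (Pre_compl seq) := by unfold Pre_compl; infer_instance

def pvWitness_compl : String := "ATgc"

def Spec_compl (seq : String) (out : String) : Prop := out = compl_alt seq
instance (seq : String) (out : String) : Decidable (Spec_compl seq out) := by unfold Spec_compl; infer_instance

-- ===== CLAIM (what is proved, stated in full; the proofs are below) =====
def Claim_equal_compl : Prop := ∀ (seq : String), Dom_compl seq → Pre_compl seq → Spec_compl seq (compl seq)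

-- ===== LEMMAS AND PROOFS =====

theorem loop_T (c : Char) (rest : List Char) (t : Option NAState) (hT : c = 'T' ∨ c = 't')
    (ht : t ≠ some NAState.rna) : NA_type_loop (c :: rest) t = NA_type_loop rest (some NAState.dna) := by
  simp [NA_type_loop, hT, ht]

theorem loop_T_rna (c : Char) (rest : List Char) (hT : c = 'T' ∨ c = 't') :
    NA_type_loop (c :: rest) (some NAState.rna) = none := by
  simp [NA_type_loop, hT]

theorem loop_U (c : Char) (rest : List Char) (t : Option NAState) (hT : ¬(c = 'T' ∨ c = 't'))
    (hU : c = 'U' ∨ c = 'u') (ht : t ≠ some NAState.dna) :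
    NA_type_loop (c :: rest) t = NA_type_loop rest (some NAState.rna) := by
  simp [NA_type_loop, hT, hU, ht]

theorem loop_U_dna (c : Char) (rest : List Char) (hT : ¬(c = 'T' ∨ c = 't'))
    (hU : c = 'U' ∨ c = 'u') : NA_type_loop (c :: rest) (some NAState.dna) = none := by
  simp [NA_type_loop, hT, hU]

theorem loop_other (c : Char) (rest : List Char) (t : Option NAState) (hT : ¬(c = 'T' ∨ c = 't'))
    (hU : ¬(c = 'U' ∨ c = 'u')) : NA_type_loop (c :: rest) t = NA_type_loop rest t := by
  simp [NA_type_loop, hT, hU]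

-- the break-scan returns DNA exactly when T/t occurs and U/u does not (on every input)
set_option maxHeartbeats 1000000 in
theorem NA_type_loop_char (l : List Char) :
    (NA_type_loop l (some NAState.empty) = some NAState.dna ↔
      (('T' ∈ l ∨ 't' ∈ l) ∧ ¬('U' ∈ l ∨ 'u' ∈ l))) ∧
    (NA_type_loop l (some NAState.dna) = some NAState.dna ↔ ¬('U' ∈ l ∨ 'u' ∈ l)) ∧
    (NA_type_loop l (some NAState.rna) ≠ some NAState.dna) := by
  induction l with
  | nil => simp [NA_type_loop]
  | cons c rest ih =>
    obtain ⟨ih1, ih2, ih3⟩ := ih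
    by_cases hT : c = 'T' ∨ c = 't'
    · have hU : ¬(c = 'U' ∨ c = 'u') := by rcases hT with h | h <;> subst h <;> decide
      rw [loop_T c rest (some NAState.empty) hT (by decide),
        loop_T c rest (some NAState.dna) hT (by decide), loop_T_rna c rest hT]
      refine ⟨?_, ?_, by decide⟩
      · rw [ih2]; simp only [List.mem_cons]; tauto
      · rw [ih2]; simp only [List.mem_cons]; tauto
    · by_cases hUc : c = 'U' ∨ c = 'u'
      · rw [loop_U c rest (some NAState.empty) hT hUc (by decide), loop_U_dna c rest hT hUc,
          loop_U c rest (some NAState.rna) hT hUc (by decide)]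
        refine ⟨iff_of_false ih3 ?_, iff_of_false (by decide) ?_, ih3⟩
        · simp only [List.mem_cons]; tauto
        · simp only [List.mem_cons]; tauto
      · rw [loop_other c rest _ hT hUc, loop_other c rest _ hT hUc, loop_other c rest _ hT hUc]
        refine ⟨?_, ?_, ih3⟩
        · rw [ih1]; simp only [List.mem_cons]; tauto
        · rw [ih2]; simp only [List.mem_cons]; tauto

-- A's scan says DNA iff B's boolean says DNA
theorem loop_iff_bool (l : List Char) :
    NA_type_loop l (some NAState.empty) = some NAState.dna ↔
      ((l.contains 'T' || l.contains 't') && !(l.contains 'U' || l.contains 'u')) = true := by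
  rw [(NA_type_loop_char l).1]
  simp only [Bool.and_eq_true, Bool.or_eq_true, Bool.not_eq_true', Bool.or_eq_false_iff,
    List.contains_eq_mem, decide_eq_true_eq, decide_eq_false_iff_not]
  tauto

theorem compl_eq_alt (seq : String) (h : Pre_compl seq) : _root_.compl seq = compl_alt seq := by
  obtain ⟨hvalid, hnotboth⟩ := h
  have hmem : ∀ c ∈ seq.toList, c ∈ (['A','C','G','T','U','a','c','g','t','u'] : List Char) := by
    intro c hc
    have := (List.all_eq_true.mp hvalid) c hc
    simpa [List.contains_eq_mem] using this
  unfold _root_.compl compl_alt NA_type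
  cases hb : ((seq.toList.contains 'T' || seq.toList.contains 't') &&
      !(seq.toList.contains 'U' || seq.toList.contains 'u')) with
  | true =>
    -- DNA case: no U/u in seq; dna table = (U->T sub) ∘ universal table on the valid chars
    have hres : NA_type_loop seq.toList (some NAState.empty) = some NAState.dna :=
      (loop_iff_bool seq.toList).mpr hb
    have hUfalse : (seq.toList.contains 'U' || seq.toList.contains 'u') = false := by
      cases hU : (seq.toList.contains 'U' || seq.toList.contains 'u') with
      | false => rfl
      | true => rw [hU] at hb; simp at hb
    have hnoU : 'U' ∉ seq.toList ∧ 'u' ∉ seq.toList := by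
      simpa [List.contains_eq_mem] using hUfalse
    simp only [hres, hb, if_true, List.map_map]
    congr 1
    refine List.map_congr_left ?_
    intro c hc
    have h10 := hmem c hc
    have hU : c ≠ 'U' := fun e => hnoU.1 (e ▸ hc)
    have hu : c ≠ 'u' := fun e => hnoU.2 (e ▸ hc)
    fin_cases h10 <;> first | (exact absurd rfl hU) | (exact absurd rfl hu) | decide
  | false =>
    -- RNA case: under Pre_, no T/t in seq; rna table = universal table on the remaining chars
    have hres : NA_type_loop seq.toList (some NAState.empty) ≠ some NAState.dna := by
      intro hc
      have h := (loop_iff_bool seq.toList).mp hc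
      rw [hb] at h
      exact Bool.false_ne_true h
    have hnoT : 'T' ∉ seq.toList ∧ 't' ∉ seq.toList := by
      by_cases hT : (seq.toList.contains 'T' || seq.toList.contains 't') = true
      · -- then by Pre_ hasU = false, so hb would be true; contradiction
        have hUfalse : (seq.toList.contains 'U' || seq.toList.contains 'u') = false := by
          cases hU : (seq.toList.contains 'U' || seq.toList.contains 'u') with
          | false => rfl
          | true => rw [hT, hU] at hnotboth; simp at hnotboth
        rw [hT, hUfalse] at hb
        simp at hb
      · simp only [Bool.or_eq_true, not_or, Bool.not_eq_true, List.contains_eq_mem,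
          decide_eq_false_iff_not] at hT
        exact hT
    simp only [hb, Bool.false_eq_true, if_false, if_neg hres]
    congr 1
    refine List.map_congr_left ?_
    intro c hc
    have h10 := hmem c hc
    have hT : c ≠ 'T' := fun e => hnoT.1 (e ▸ hc)
    have ht : c ≠ 't' := fun e => hnoT.2 (e ▸ hc)
    fin_cases h10 <;> first | (exact absurd rfl hT) | (exact absurd rfl ht) | decide

-- ===== VERDICT (by name: the statement is the Claim_ definition above) =====
theorem compl_spec : Claim_equal_compl := by
  intro seq _ h
  unfold Spec_compl
  exact compl_eq_alt seq h
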